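-- pv_equiv track=rewrite | github.com/ramidem/RTWD-reborn | Old/Python/Codecademy/CS_Path/03-Flow_Data_and_Iteration/03-Loops/code_challenges/03-Delete_Starting_Even_Numbers.py | delete_starting_evens
-- ===== SOURCE A (Python) =====
-- def delete_starting_evens(lst):
--   first_even = []
--
--   for i in range(len(lst)):
--     if lst[i] % 2 == 0:
--       first_even.append(lst[i])
--     else:
--       break
--   return lst[len(first_even):]
-- ===== SOURCE B (Python) =====
-- def delete_starting_evens(lst):
--   out = []
--   seen_odd = False
--   for x in lst:
--     if x % 2 != 0:
--       seen_odd = True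
--     if seen_odd:
--       out.append(x)
--   return out
-- ===== Notes on version B (the rewrite author's own statement) =====
-- stated objective: alternative
-- what changed: B makes one full pass with a boolean 'seen_odd' latch and builds the output list directly element by element, instead of counting the even prefix and slicing the input; no slicing, no index arithmetic, different maintained state.
import Mathlib
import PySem

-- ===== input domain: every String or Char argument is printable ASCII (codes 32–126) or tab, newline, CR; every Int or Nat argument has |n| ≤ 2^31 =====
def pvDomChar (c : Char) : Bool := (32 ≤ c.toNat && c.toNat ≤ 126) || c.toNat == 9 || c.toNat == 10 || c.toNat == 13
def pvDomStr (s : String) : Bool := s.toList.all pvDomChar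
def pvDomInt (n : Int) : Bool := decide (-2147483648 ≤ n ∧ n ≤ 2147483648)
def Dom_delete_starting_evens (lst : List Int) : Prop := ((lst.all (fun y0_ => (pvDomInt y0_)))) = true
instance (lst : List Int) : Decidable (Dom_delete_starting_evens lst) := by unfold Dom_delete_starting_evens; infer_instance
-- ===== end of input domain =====

-- B makes one full pass with a boolean 'seen_odd' latch, appending to the output once the latch is set, instead of counting the even prefix and slicing; same cost, different state.

-- ===== PORT A =====
-- the 'for i in range(len(lst))' loop: accumulate first_even, break on the first odd element
def pvGoA (lst : List Int) (acc : List Int) (i : Nat) : List Int :=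
  if h : i < lst.length then
    if PySem.Int.mod lst[i] 2 = 0 then pvGoA lst (acc ++ [lst[i]]) (i + 1)
    else acc
  else acc
termination_by lst.length - i

def delete_starting_evens (lst : List Int) : List Int :=
  PySem.List.slice lst (some ((pvGoA lst [] 0).length : Int)) none

-- ===== PORT B =====
-- the 'for x in lst' loop: state (seen_odd, out); latch seen_odd on the first odd x, append when set
def pvStepB (st : Bool × List Int) (x : Int) : Bool × List Int :=
  let seen := st.1 || decide (PySem.Int.mod x 2 ≠ 0)
  (seen, if seen then st.2 ++ [x] else st.2)

def delete_starting_evens_alt (lst : List Int) : List Int :=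
  (lst.foldl pvStepB (false, [])).2

-- ===== PRECONDITION & SPEC =====
def Spec_delete_starting_evens (lst : List Int) (out : List Int) : Prop := out = delete_starting_evens_alt lst
instance (lst : List Int) (out : List Int) : Decidable (Spec_delete_starting_evens lst out) := by unfold Spec_delete_starting_evens; infer_instance

-- ===== CLAIM =====
def Claim_equal_delete_starting_evens : Prop := ∀ (lst : List Int), Dom_delete_starting_evens lst → Spec_delete_starting_evens lst (delete_starting_evens lst)

-- ===== LEMMAS AND PROOFS =====

-- count of leading even elements: characterises A's loop
def pvCntEven : List Int → Nat
  | [] => 0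
  | x :: t => if PySem.Int.mod x 2 = 0 then pvCntEven t + 1 else 0

lemma pvGoA_len (lst : List Int) : ∀ i acc, i ≤ lst.length →
    (pvGoA lst acc i).length = acc.length + pvCntEven (lst.drop i) := by
  intro i
  induction h : lst.length - i generalizing i with
  | zero =>
    intro acc hi
    have : i = lst.length := by omega
    subst this
    rw [pvGoA]
    simp [pvCntEven]
  | succ n ih =>
    intro acc hi
    have hlt : i < lst.length := by omega
    rw [pvGoA, dif_pos hlt]
    have hdrop : lst.drop i = lst[i] :: lst.drop (i + 1) :=
      List.drop_eq_getElem_cons hlt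
    rw [hdrop]
    by_cases he : PySem.Int.mod lst[i] 2 = 0
    · rw [if_pos he, ih (i + 1) (by omega) _ (by omega)]
      rw [pvCntEven, if_pos he]
      simp; omega
    · rw [if_neg he, pvCntEven, if_neg he]; omega

-- once the latch is set, the fold just appends everything
lemma foldB_true (xs : List Int) : ∀ acc, xs.foldl pvStepB (true, acc) = (true, acc ++ xs) := by
  induction xs with
  | nil => intro acc; simp
  | cons x t ih => intro acc; simp [pvStepB, ih]

-- while the latch is unset, the fold drops the even prefix
lemma foldB_false (xs : List Int) : ∀ acc,
    (xs.foldl pvStepB (false, acc)).2 = acc ++ xs.drop (pvCntEven xs) := by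
  induction xs with
  | nil => intro acc; simp [pvCntEven]
  | cons x t ih =>
    intro acc
    simp only [List.foldl_cons, pvStepB, pvCntEven, Bool.false_or]
    by_cases he : PySem.Int.mod x 2 = 0
    · have hd : decide (PySem.Int.mod x 2 ≠ 0) = false := by
        rw [PySem.Int.mod_eq_emod_of_pos (by omega)] at he; simp; omega
      rw [hd, if_pos he, if_neg (by simp)]
      rw [ih]
      simp
    · have hd : decide (PySem.Int.mod x 2 ≠ 0) = true := by
        rw [PySem.Int.mod_eq_emod_of_pos (by omega)] at he; simp; omega
      rw [hd, if_neg he, if_pos rfl, foldB_true]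
      simp

-- ===== VERDICT =====
theorem delete_starting_evens_spec : Claim_equal_delete_starting_evens := by
  intro lst _
  unfold Spec_delete_starting_evens delete_starting_evens delete_starting_evens_alt
  rw [pvGoA_len lst 0 [] (by omega), foldB_false]
  simp [PySem.List.slice_from_natCast]
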